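-- pv_equiv track=rewrite | github.com/bingbai-ux/fc-demand-forecast | analysis/shinjuku_active_simulation.py | filter_active_products
-- ===== SOURCE A (Python) =====
-- def filter_active_products(products):
--     """廃盤商品を除外: isActive=True または 在庫>0"""
--     active_products = []
--     excluded_count = 0
--
--     for p in products:
--         is_active = p.get('isActive', False)
--         current_stock = p.get('currentStock', 0)
--
--         # マイナス在庫は0として扱う
--         if current_stock < 0:
--             p['currentStock'] = 0
--             current_stock = 0
--
--         # isActive=True または 在庫>0 の商品を残す
--         if is_active or current_stock > 0:
--             active_products.append(p)
--         else:
--             excluded_count += 1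
--
--     return active_products, excluded_count
-- ===== SOURCE B (Python) =====
-- def _solve_one(p):
--     """base case: classify a single product, clamping negative stock in place"""
--     stock = p.get('currentStock', 0)
--     if stock < 0:
--         p['currentStock'] = 0
--         stock = 0
--     if p.get('isActive', False) or stock > 0:
--         return [p], 0
--     return [], 1
--
--
-- def filter_active_products(products):
--     """廃盤商品を除外: isActive=True または 在庫>0 (divide and conquer)"""
--     def solve(lo, hi):
--         if hi <= lo:
--             return [], 0
--         if hi - lo == 1:
--             return _solve_one(products[lo])
--         mid = (lo + hi) // 2
--         left_active, left_excluded = solve(lo, mid)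
--         right_active, right_excluded = solve(mid, hi)
--         return left_active + right_active, left_excluded + right_excluded
--     active_products, excluded_count = solve(0, len(products))
--     return active_products, excluded_count
-- ===== Notes on version B (the rewrite author's own statement) =====
-- stated objective: alternative
-- what changed: B replaces A's single left-to-right accumulator loop by a divide-and-conquer recursion on index ranges: each half is solved independently and the results are combined by list concatenation and addition of the excluded counts.
import Mathlib
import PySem

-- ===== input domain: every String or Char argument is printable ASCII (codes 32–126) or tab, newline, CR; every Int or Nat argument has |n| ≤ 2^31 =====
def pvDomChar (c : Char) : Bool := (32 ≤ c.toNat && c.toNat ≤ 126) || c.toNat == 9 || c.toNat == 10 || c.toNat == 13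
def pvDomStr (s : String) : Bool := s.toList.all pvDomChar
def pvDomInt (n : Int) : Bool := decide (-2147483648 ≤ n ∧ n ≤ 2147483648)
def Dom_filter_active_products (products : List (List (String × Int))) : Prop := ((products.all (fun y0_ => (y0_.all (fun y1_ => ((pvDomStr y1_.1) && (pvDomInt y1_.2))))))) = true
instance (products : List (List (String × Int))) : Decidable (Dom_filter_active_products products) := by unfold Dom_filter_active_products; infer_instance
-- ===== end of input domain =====

-- B replaces A's single accumulator loop by a divide-and-conquer recursion on index ranges
-- (objective: alternative). Both versions clamp negative stock in the product dicts in the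
-- same left-to-right order; the equivalence proved here is about the return value.

-- hand-written association-list dict primitives (exact for Python dicts: lookup = first match,
-- assignment overwrites the matching key in place, appends if absent)
def dGetD (d : List (String × Int)) (k : String) (v : Int) : Int :=
  match d with
  | [] => v
  | q :: rest => if q.1 == k then q.2 else dGetD rest k v

def dSet (d : List (String × Int)) (k : String) (v : Int) : List (String × Int) :=
  match d with
  | [] => [(k, v)]
  | q :: rest => if q.1 == k then (k, v) :: rest else q :: dSet rest k v

-- ===== PORT A =====
def filter_active_products (products : List (List (String × Int))) : (List (List (String × Int))) × Int :=
  products.foldl (fun acc p =>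
    let is_active := dGetD p "isActive" 0
    let current_stock := dGetD p "currentStock" 0
    let p' := if current_stock < 0 then dSet p "currentStock" 0 else p
    let current_stock' := if current_stock < 0 then 0 else current_stock
    if is_active ≠ 0 ∨ current_stock' > 0 then (acc.1 ++ [p'], acc.2)
    else (acc.1, acc.2 + 1)) ([], 0)

-- ===== PORT B =====
-- B's '_solve_one': classify a single product, clamping negative stock
def solveOneB (p : List (String × Int)) : (List (List (String × Int))) × Int :=
  let stock := dGetD p "currentStock" 0
  let p' := if stock < 0 then dSet p "currentStock" 0 else p
  let stock' := if stock < 0 then 0 else stock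
  if dGetD p' "isActive" 0 ≠ 0 ∨ stock' > 0 then ([p'], 0)
  else ([], 1)

-- B's inner 'solve(lo, hi)': divide-and-conquer on the index range [lo, hi).
-- products[lo] is total in Lean via getElem?; the none branch is unreachable (lo < hi ≤ len).
def solveB (products : List (List (String × Int))) (lo hi : Nat) : (List (List (String × Int))) × Int :=
  if hle : hi ≤ lo then ([], 0)
  else if h1 : hi - lo = 1 then
    match products[lo]? with
    | none => ([], 0)
    | some p => solveOneB p
  else
    let mid := (lo + hi) / 2
    let l := solveB products lo mid
    let r := solveB products mid hi
    (l.1 ++ r.1, l.2 + r.2)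
termination_by hi - lo
decreasing_by all_goals omega

def filter_active_products_alt (products : List (List (String × Int))) : (List (List (String × Int))) × Int :=
  solveB products 0 products.length

-- ===== PRECONDITION & SPEC =====
def Spec_filter_active_products (products : List (List (String × Int))) (out : (List (List (String × Int))) × Int) : Prop := out = filter_active_products_alt products
instance (products : List (List (String × Int))) (out : (List (List (String × Int))) × Int) : Decidable (Spec_filter_active_products products out) := by unfold Spec_filter_active_products; infer_instance

-- ===== CLAIM (what is proved, stated in full; the proofs are below) =====
def Claim_equal_filter_active_products : Prop := ∀ (products : List (List (String × Int))), Dom_filter_active_products products → Spec_filter_active_products products (filter_active_products products)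

-- ===== LEMMAS AND PROOFS =====

-- common normal form both ports are reduced to
def clampStock (p : List (String × Int)) : List (String × Int) :=
  if dGetD p "currentStock" 0 < 0 then dSet p "currentStock" 0 else p

def activePred (p : List (String × Int)) : Bool :=
  decide (dGetD p "isActive" 0 ≠ 0) || decide (dGetD p "currentStock" 0 > 0)

def normF (ps : List (List (String × Int))) : (List (List (String × Int))) × Int :=
  ((ps.map clampStock).filter activePred,
   (ps.length : Int) - ((ps.map clampStock).filter activePred).length)

theorem dGetD_dSet_of_ne (d : List (String × Int)) (k k' : String) (v w : Int)
    (h : k' ≠ k) : dGetD (dSet d k v) k' w = dGetD d k' w := by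
  induction d with
  | nil => simp [dSet, dGetD]; exact fun hk => absurd hk.symm h
  | cons q rest ih =>
    by_cases hq : q.1 = k
    · simp [dSet, hq, dGetD, Ne.symm h]
    · by_cases hq' : q.1 = k'
      · simp [dSet, dGetD, hq', h]
      · simpa [dSet, hq, dGetD, hq'] using ih

theorem dGetD_dSet_self (d : List (String × Int)) (k : String) (v w : Int) :
    dGetD (dSet d k v) k w = v := by
  induction d with
  | nil => simp [dSet, dGetD]
  | cons q rest ih =>
    by_cases hq : q.1 = k
    · simp [dSet, hq, dGetD]
    · simpa [dSet, hq, dGetD] using ih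

theorem activePred_clamp_iff (p : List (String × Int)) :
    activePred (clampStock p) = true ↔
      (dGetD p "isActive" 0 ≠ 0 ∨
        (if dGetD p "currentStock" 0 < 0 then (0:Int) else dGetD p "currentStock" 0) > 0) := by
  unfold activePred clampStock
  by_cases h : dGetD p "currentStock" 0 < 0
  · simp [h, dGetD_dSet_self,
      dGetD_dSet_of_ne _ _ _ _ _ (by decide : ("isActive":String) ≠ "currentStock")]
  · simp [h]

-- B reads isActive from the (possibly clamped) dict; clamping does not touch that key
theorem dGetD_isActive_clamp (p : List (String × Int)) :
    dGetD (clampStock p) "isActive" 0 = dGetD p "isActive" 0 := by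
  unfold clampStock
  split
  · exact dGetD_dSet_of_ne _ _ _ _ _ (by decide)
  · rfl

-- A's fold computes the normal form
theorem fap_foldl (ps : List (List (String × Int))) (acc : List (List (String × Int))) (k : Int) :
    ps.foldl (fun acc p =>
      let is_active := dGetD p "isActive" 0
      let current_stock := dGetD p "currentStock" 0
      let p' := if current_stock < 0 then dSet p "currentStock" 0 else p
      let current_stock' := if current_stock < 0 then 0 else current_stock
      if is_active ≠ 0 ∨ current_stock' > 0 then (acc.1 ++ [p'], acc.2)
      else (acc.1, acc.2 + 1)) (acc, k)
    = (acc ++ (normF ps).1, k + (normF ps).2) := by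
  induction ps generalizing acc k with
  | nil => simp [normF]
  | cons p rest ih =>
    simp only [List.foldl_cons]
    have hp : (if dGetD p "currentStock" 0 < 0 then dSet p "currentStock" 0 else p)
        = clampStock p := rfl
    by_cases hb : activePred (clampStock p) = true
    · rw [if_pos ((activePred_clamp_iff p).mp hb)]
      simp only [hp]
      rw [ih]
      simp only [normF, List.map_cons, List.filter_cons, hb, if_true, List.length_cons]
      rw [Prod.mk.injEq]
      refine ⟨by simp, by push_cast; omega⟩
    · rw [if_neg (fun hc => hb ((activePred_clamp_iff p).mpr hc))]
      rw [ih]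
      simp only [normF, List.map_cons, List.filter_cons, hb, List.length_cons]
      rw [Prod.mk.injEq]
      refine ⟨rfl, by push_cast; omega⟩

-- the normal form splits over append
theorem normF_append (xs ys : List (List (String × Int))) :
    normF (xs ++ ys) = ((normF xs).1 ++ (normF ys).1, (normF xs).2 + (normF ys).2) := by
  simp only [normF, List.map_append, List.filter_append, List.length_append]
  rw [Prod.mk.injEq]
  refine ⟨rfl, by push_cast; omega⟩

-- B's divide-and-conquer computes the normal form of the slice [lo, hi)
theorem solveB_eq_normF (products : List (List (String × Int))) (lo hi : Nat)
    (hhi : hi ≤ products.length) :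
    solveB products lo hi = normF ((products.drop lo).take (hi - lo)) := by
  by_cases hle : hi ≤ lo
  · rw [solveB]
    simp [hle, Nat.sub_eq_zero_of_le hle, normF]
  · by_cases h1 : hi - lo = 1
    · have hlt : lo < products.length := by omega
      have hdrop : products.drop lo = products[lo] :: products.drop (lo + 1) :=
        (List.getElem_cons_drop hlt).symm
      rw [solveB]
      simp only [hle, dite_false, h1, dite_true, hdrop, List.take_succ_cons, List.take_zero]
      have hget : products[lo]? = some products[lo] := List.getElem?_eq_getElem hlt
      rw [hget]
      set p := products[lo]
      have hp' : (if dGetD p "currentStock" 0 < 0 then dSet p "currentStock" 0 else p)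
          = clampStock p := rfl
      unfold solveOneB
      simp only [hp', dGetD_isActive_clamp]
      by_cases hb : activePred (clampStock p) = true
      · have := (activePred_clamp_iff p).mp hb
        rw [if_pos this]
        simp [normF, hb]
      · rw [if_neg (fun hc => hb ((activePred_clamp_iff p).mpr hc))]
        simp [normF, hb]
    · rw [solveB]
      simp only [hle, dite_false, h1, dite_false]
      have hmid1 : lo < (lo + hi) / 2 := by omega
      have hmid2 : (lo + hi) / 2 < hi := by omega
      rw [solveB_eq_normF products lo ((lo + hi) / 2) (by omega),
          solveB_eq_normF products ((lo + hi) / 2) hi hhi]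
      have hsplit : (products.drop lo).take (hi - lo)
          = (products.drop lo).take ((lo + hi) / 2 - lo)
            ++ (products.drop ((lo + hi) / 2)).take (hi - (lo + hi) / 2) := by
        have hsum : hi - lo = ((lo + hi) / 2 - lo) + (hi - (lo + hi) / 2) := by omega
        have hdd : (products.drop lo).drop ((lo + hi) / 2 - lo)
            = products.drop ((lo + hi) / 2) := by
          rw [List.drop_drop]
          congr 1
          omega
        rw [hsum, List.take_add, hdd]
      rw [hsplit, normF_append]
  termination_by hi - lo
  decreasing_by all_goals omega

-- ===== VERDICT (by name: the statement is the Claim_ definition above) =====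
theorem filter_active_products_spec : Claim_equal_filter_active_products := by
  intro products _
  unfold Spec_filter_active_products filter_active_products filter_active_products_alt
  rw [fap_foldl, solveB_eq_normF products 0 products.length (le_refl _)]
  simp
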